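-- pv_equiv track=rewrite | github.com/kalmi901/Symplectic | Direct/Gauss.py | bin_leftshift
-- ===== SOURCE A (Python) =====
-- def bin_leftshift(bit, mask, shift):
-- 	n = len(bit)
-- 	c = [0] * n
-- 	for i in range(0, n):
-- 		c[i] = int(bit[i])
-- 	for i in range(0, n):
-- 		if (bit[i] == "1") and (mask[i] == "1"):
-- 			j = i + shift
-- 			if (j < n):
-- 				#c[i] = 0
-- 				c[j] = 1
--
-- 	c = ''.join(str(n) for n in c)
-- 	return c
-- ===== SOURCE B (Python) =====
-- def bin_leftshift(bit, mask, shift):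
--     # Bitset arithmetic instead of per-character loops: parse the strings as
--     # base-2 integers, select the masked set bits with &, move each one
--     # 'shift' places left-to-right with a numeric right shift (MSB-first
--     # strings: index i+shift is bit value position (n-1-i)-shift; bits pushed
--     # past the last position fall off, exactly the j < n guard), OR the
--     # result back onto the original, and format it as an n-wide binary string.
--     n = len(bit)
--     if n == 0:
--         return ''
--     b = int(bit, 2)
--     m = int(mask[:n].ljust(n, '0'), 2)
--     return format(b | ((b & m) >> shift), '0{}b'.format(n))
-- ===== Notes on version B (the rewrite author's own statement) =====
-- stated objective: alternative
-- what changed: Replaces A's two-pass scatter over a mutable int scratch array (fill with int(bit[i]), then write 1 into cells i+shift, then join) with integer bitset arithmetic: parse bit and mask as base-2 numbers and compute b | ((b & m) >> shift), formatted back as an n-wide binary string, with no per-character loop.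
-- outside the precondition, e.g. on bin_leftshift('22', '11', 1): A returns '22', B raises ValueError; on bin_leftshift('10', '10', -1): A returns '11', B raises ValueError; on bin_leftshift('1', 'x', 0): A returns '1', B raises ValueError
import Mathlib
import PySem

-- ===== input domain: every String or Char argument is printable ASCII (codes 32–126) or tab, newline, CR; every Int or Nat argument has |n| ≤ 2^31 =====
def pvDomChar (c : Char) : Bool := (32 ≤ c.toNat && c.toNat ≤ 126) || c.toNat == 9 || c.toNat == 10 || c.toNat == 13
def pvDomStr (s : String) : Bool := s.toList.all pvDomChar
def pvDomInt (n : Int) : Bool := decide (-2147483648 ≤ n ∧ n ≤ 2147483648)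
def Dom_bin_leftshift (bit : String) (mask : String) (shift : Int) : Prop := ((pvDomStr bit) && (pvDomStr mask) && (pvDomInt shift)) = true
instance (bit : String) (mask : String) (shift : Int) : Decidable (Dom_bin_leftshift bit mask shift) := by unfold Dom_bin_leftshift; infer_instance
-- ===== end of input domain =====

-- B replaces A's per-character scatter loop (scratch int array, write 1 into cells
-- i+shift, join) by integer bitset arithmetic: parse both strings in base 2 and
-- compute b | ((b & m) >> shift), then format back; objective: alternative.

-- ===== PORT A =====
-- int(bit[i]) for a single character: exact where Python returns (a digit character);
-- on non-digits Python raises ValueError — those inputs are excluded by Pre_.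
def pvDigitVal (bs : List Char) (i : Int) : Int :=
  (PySem.Int.ofChars? [PySem.List.pyGetD bs i ' ']).getD 0

-- loop body of A's first loop: c[i] = int(bit[i])
def pvFillStep (bs : List Char) (c : List Int) (i : Int) : List Int :=
  PySem.List.pySetD c i (pvDigitVal bs i)

-- (bit[i] == "1") and (mask[i] == "1"); mask[i] read with a default — Python raises
-- IndexError when i ≥ len(mask) and bit[i] == "1", excluded by Pre_.
def pvMaskHit (bs ms : List Char) (i : Int) : Bool :=
  PySem.List.pyGetD bs i ' ' == '1' && PySem.List.pyGetD ms i ' ' == '1'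

-- loop body of A's second loop: if hit then j = i + shift; if j < n: c[j] = 1
def pvShiftStep (bs ms : List Char) (shift n : Int) (c : List Int) (i : Int) : List Int :=
  if pvMaskHit bs ms i then
    (if i + shift < n then PySem.List.pySetD c (i + shift) 1 else c)
  else c

def bin_leftshift (bit : String) (mask : String) (shift : Int) : String :=
  let bs := bit.toList
  let ms := mask.toList
  let n : Int := PySem.List.len bs
  -- c = [0] * n;  for i in range(0, n): c[i] = int(bit[i])
  let c1 := (PySem.List.pyRange 0 n 1).foldl (pvFillStep bs) (List.replicate bs.length 0)
  -- for i in range(0, n): if (bit[i] == "1") and (mask[i] == "1"): j = i + shift; if j < n: c[j] = 1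
  let c2 := (PySem.List.pyRange 0 n 1).foldl (pvShiftStep bs ms shift n) c1
  -- c = ''.join(str(v) for v in c)  (''.join = concatenation of the str(v) pieces, exact)
  String.mk ((c2.map PySem.Int.toChars).flatten)

-- ===== PORT B =====
-- int(s, 2): exact for strings of '0'/'1' characters (the only ones Pre_ admits);
-- Python's extra accepted forms (sign, whitespace, '_', '0b') do not occur under Pre_.
def pvParseBin (cs : List Char) : Nat :=
  cs.foldl (fun a c => 2 * a + (if c = '1' then 1 else 0)) 0

-- format(x, 'b') for x ≥ 0, hand-ported step for step (repeated divmod by 2, digits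
-- MSB first, '0' for zero); fuel x+1 is enough since the argument at least halves.
def pvBinAux : Nat → Nat → List Char → List Char
  | 0, _, acc => acc
  | f + 1, x, acc =>
    if x < 2 then (if x = 1 then '1' else '0') :: acc
    else pvBinAux f (x / 2) ((if x % 2 = 1 then '1' else '0') :: acc)

def bin_leftshift_alt (bit : String) (mask : String) (shift : Int) : String :=
  let bs := bit.toList
  let n := bs.length
  if n = 0 then "" else
    let b := pvParseBin bs
    -- mask[:n].ljust(n, '0')
    let mt := mask.toList.take n
    let m := pvParseBin (mt ++ List.replicate (n - mt.length) '0')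
    -- b | ((b & m) >> shift)  (shift ≥ 0 under Pre_; Python raises on a negative shift)
    let r := b ||| ((b &&& m) >>> shift.toNat)
    -- format(r, '0{}b'.format(n)): binary digits zero-padded on the left to width n
    let digits := pvBinAux (r + 1) r []
    String.mk (List.replicate (n - digits.length) '0' ++ digits)

-- ===== PRECONDITION & SPEC =====
-- Pre_ restricts to the natural domain of this bitstring routine: bit (and the first
-- len(bit) characters of mask) consist of '0'/'1' only, every '1' position of bit is
-- covered by mask (else A raises IndexError), and shift is non-negative unless bit is
-- empty.  A also RETURNS on other digit strings, on arbitrary mask characters and on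
-- negative shifts (negative-index wraparound), but B's int(·, 2) / '>>' raise there,
-- so those inputs are excluded (see the cites in the claim).
def Pre_bin_leftshift (bit : String) (mask : String) (shift : Int) : Prop :=
  (0 ≤ shift ∨ bit.toList = []) ∧
  bit.toList.all (fun c => c == '0' || c == '1') = true ∧
  (mask.toList.take bit.toList.length).all (fun c => c == '0' || c == '1') = true ∧
  (∀ i ∈ List.range bit.toList.length, bit.toList.getD i ' ' = '1' → i < mask.toList.length)
instance (bit : String) (mask : String) (shift : Int) : Decidable (Pre_bin_leftshift bit mask shift) := by
  unfold Pre_bin_leftshift; infer_instance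

def pvWitness_bin_leftshift : String × String × Int := ("1010", "1100", 2)

def Spec_bin_leftshift (bit : String) (mask : String) (shift : Int) (out : String) : Prop := out = bin_leftshift_alt bit mask shift
instance (bit : String) (mask : String) (shift : Int) (out : String) : Decidable (Spec_bin_leftshift bit mask shift out) := by unfold Spec_bin_leftshift; infer_instance

-- ===== CLAIM (what is proved, stated in full; the proofs are below) =====
def Claim_equal_bin_leftshift : Prop := ∀ (bit : String) (mask : String) (shift : Int), Dom_bin_leftshift bit mask shift → Pre_bin_leftshift bit mask shift → Spec_bin_leftshift bit mask shift (bin_leftshift bit mask shift)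

-- ===== LEMMAS AND PROOFS =====

-- ---- A-side: the scatter loops, position by position ----

theorem pv_fill_length (bs : List Char) :
    ∀ (idx : List Int) (c : List Int), (idx.foldl (pvFillStep bs) c).length = c.length := by
  intro idx
  induction idx with
  | nil => intro c; rfl
  | cons i t ih =>
    intro c
    simp only [List.foldl_cons, ih, pvFillStep, PySem.List.length_pySetD]

theorem pv_fill_getD_not_mem (bs : List Char) (j : Nat) :
    ∀ (idx : List Int) (c : List Int), (∀ i ∈ idx, 0 ≤ i) → (j : Int) ∉ idx →
      (idx.foldl (pvFillStep bs) c).getD j 0 = c.getD j 0 := by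
  intro idx
  induction idx with
  | nil => intro c _ _; rfl
  | cons i t ih =>
    intro c hpos hj
    simp only [List.mem_cons, not_or] at hj
    simp only [List.foldl_cons]
    rw [ih _ (fun i hi => hpos i (List.mem_cons_of_mem _ hi)) hj.2]
    have h0 : 0 ≤ i := hpos i (List.mem_cons_self ..)
    rw [pvFillStep, PySem.List.pySetD_of_nonneg _ _ h0]
    have hne : i.toNat ≠ j := by omega
    simp [List.getD, List.getElem?_set_ne hne]

theorem pv_fill_getD_mem (bs : List Char) (j : Nat) :
    ∀ (idx : List Int) (c : List Int), (∀ i ∈ idx, 0 ≤ i) → (j : Int) ∈ idx → j < c.length →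
      (idx.foldl (pvFillStep bs) c).getD j 0 = pvDigitVal bs j := by
  intro idx
  induction idx with
  | nil => intro c _ h _; exact absurd h (List.not_mem_nil)
  | cons i t ih =>
    intro c hpos hj hlt
    simp only [List.foldl_cons]
    by_cases hmem : (j : Int) ∈ t
    · rw [ih _ (fun i hi => hpos i (List.mem_cons_of_mem _ hi)) hmem]
      simp [pvFillStep, PySem.List.length_pySetD, hlt]
    · have hij : i = (j : Int) := by
        rcases List.mem_cons.mp hj with h | h
        · exact h.symm
        · exact absurd h hmem
      subst hij
      rw [pv_fill_getD_not_mem bs j t _ (fun i hi => hpos i (List.mem_cons_of_mem _ hi)) hmem]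
      rw [pvFillStep, PySem.List.pySetD_of_nonneg _ _ (by omega)]
      simp only [Int.toNat_natCast]
      simp [List.getD, hlt]

theorem pv_shift_length (bs ms : List Char) (shift n : Int) :
    ∀ (idx : List Int) (c : List Int), (idx.foldl (pvShiftStep bs ms shift n) c).length = c.length := by
  intro idx
  induction idx with
  | nil => intro c; rfl
  | cons i t ih =>
    intro c
    simp only [List.foldl_cons, ih, pvShiftStep]
    split
    · split <;> simp [PySem.List.length_pySetD]
    · rfl

theorem pv_shift_getD_not (bs ms : List Char) (shift n : Int) (hs : 0 ≤ shift) (j : Nat) :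
    ∀ (idx : List Int) (c : List Int), (∀ i ∈ idx, 0 ≤ i) →
      (∀ i ∈ idx, ¬(pvMaskHit bs ms i = true ∧ i + shift = (j : Int))) →
      (idx.foldl (pvShiftStep bs ms shift n) c).getD j 0 = c.getD j 0 := by
  intro idx
  induction idx with
  | nil => intro c _ _; rfl
  | cons i t ih =>
    intro c hpos hno
    simp only [List.foldl_cons]
    rw [ih _ (fun i hi => hpos i (List.mem_cons_of_mem _ hi))
        (fun i hi => hno i (List.mem_cons_of_mem _ hi))]
    have h0 : 0 ≤ i := hpos i (List.mem_cons_self ..)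
    have hni := hno i (List.mem_cons_self ..)
    rw [pvShiftStep]
    by_cases hhit : pvMaskHit bs ms i = true
    · have hne : i + shift ≠ (j : Int) := fun h => hni ⟨hhit, h⟩
      simp only [hhit, if_true]
      split
      · rw [PySem.List.pySetD_of_nonneg _ _ (by omega)]
        have : (i + shift).toNat ≠ j := by omega
        simp [List.getD, List.getElem?_set_ne this]
      · rfl
    · simp [hhit]

theorem pv_shift_getD_hit (bs ms : List Char) (shift n : Int) (hs : 0 ≤ shift) (j : Nat)
    (hjn : (j : Int) < n) :
    ∀ (idx : List Int) (c : List Int), (∀ i ∈ idx, 0 ≤ i) → (c.length : Int) = n →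
      (∃ i ∈ idx, pvMaskHit bs ms i = true ∧ i + shift = (j : Int)) →
      (idx.foldl (pvShiftStep bs ms shift n) c).getD j 0 = 1 := by
  intro idx
  induction idx with
  | nil => intro c _ _ h; simp at h
  | cons i t ih =>
    intro c hpos hlen hex
    simp only [List.foldl_cons]
    by_cases hmem : ∃ i ∈ t, pvMaskHit bs ms i = true ∧ i + shift = (j : Int)
    · refine ih _ (fun i hi => hpos i (List.mem_cons_of_mem _ hi)) ?_ hmem
      rw [pvShiftStep]
      split
      · split <;> simp [PySem.List.length_pySetD, hlen]
      · exact hlen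
    · have hi : pvMaskHit bs ms i = true ∧ i + shift = (j : Int) := by
        rcases hex with ⟨i', hi', hP⟩
        rcases List.mem_cons.mp hi' with h | h
        · exact h ▸ hP
        · exact absurd ⟨i', h, hP⟩ hmem
      have hnot : ∀ i' ∈ t, ¬(pvMaskHit bs ms i' = true ∧ i' + shift = (j : Int)) :=
        fun i' h hP => hmem ⟨i', h, hP⟩
      rw [pv_shift_getD_not bs ms shift n hs j t _
          (fun i hi => hpos i (List.mem_cons_of_mem _ hi)) hnot]
      rw [pvShiftStep, if_pos hi.1, hi.2, if_pos hjn, PySem.List.pySetD_natCast]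
      have hjc : j < c.length := by omega
      simp [List.getD, hjc]

theorem pv_flatten_singleton {α β : Type} (l : List α) (f : α → β) :
    (l.map (fun x => [f x])).flatten = l.map f := by
  induction l with
  | nil => rfl
  | cons a t ih => simp_all

-- A's result, characterised per output position (bit nonempty, binary, shift ≥ 0):
-- character j is '1' if a masked set bit lands on j, else bit[j] itself.
theorem pv_A_char (bit mask : String) (shift : Int) (hs : 0 ≤ shift)
    (hbin : ∀ c ∈ bit.toList, c = '0' ∨ c = '1') :
    bin_leftshift bit mask shift = String.mk ((List.range bit.toList.length).map (fun (j : Nat) =>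
      if shift ≤ (j : Int) ∧ bit.toList.getD (j - shift.toNat) ' ' = '1' ∧
         mask.toList.getD (j - shift.toNat) ' ' = '1'
      then '1' else bit.toList.getD j ' ')) := by
  simp only [bin_leftshift]
  apply congrArg
  set bs := bit.toList with hbs
  set ms := mask.toList with hms
  set c1 := (PySem.List.pyRange 0 (PySem.List.len bs) 1).foldl (pvFillStep bs)
      (List.replicate bs.length 0) with hc1
  set c2 := (PySem.List.pyRange 0 (PySem.List.len bs) 1).foldl
      (pvShiftStep bs ms shift (PySem.List.len bs)) c1 with hc2
  have hl1 : c1.length = bs.length := by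
    rw [hc1, pv_fill_length, List.length_replicate]
  have hl2 : c2.length = bs.length := by
    rw [hc2, pv_shift_length, hl1]
  -- c2 as a map over output positions
  have hc2' : c2 = (List.range bs.length).map (fun j => c2.getD j 0) := by
    apply List.ext_getElem
    · simp [hl2]
    · intro k h1 h2
      simp only [List.getElem_map, List.getElem_range]
      have : k < c2.length := by simpa using h1
      simp [List.getD, List.getElem?_eq_getElem this]
  conv_lhs => rw [hc2', List.map_map]
  have hpoint : ∀ k ∈ List.range bs.length,
      (PySem.Int.toChars ∘ fun j => c2.getD j 0) k =
        [if shift ≤ (k : Int) ∧ bs.getD (k - shift.toNat) ' ' = '1' ∧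
            ms.getD (k - shift.toNat) ' ' = '1'
         then '1' else bs.getD k ' '] := by
    intro k hk
    simp only [Function.comp_apply]
    have hkbs : k < bs.length := List.mem_range.mp hk
    -- value of c2 at position k
    by_cases hb : shift ≤ (k : Int) ∧ bs.getD (k - shift.toNat) ' ' = '1' ∧
        ms.getD (k - shift.toNat) ' ' = '1'
    · have hhit : ∃ i ∈ PySem.List.pyRange 0 (PySem.List.len bs) 1,
          pvMaskHit bs ms i = true ∧ i + shift = (k : Int) := by
        refine ⟨(k : Int) - shift, ?_, ?_, by omega⟩
        · rw [PySem.List.mem_pyRange_one]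
          constructor
          · omega
          · have := PySem.List.len_eq bs; omega
        · have hcast : (k : Int) - shift = ((k - shift.toNat : Nat) : Int) := by omega
          simp only [pvMaskHit, hcast, PySem.List.pyGetD_natCast, Bool.and_eq_true, beq_iff_eq]
          exact ⟨hb.2.1, hb.2.2⟩
      have h2 : c2.getD k 0 = 1 := by
        have := pv_shift_getD_hit bs ms shift (PySem.List.len bs) hs k
          (by have := PySem.List.len_eq bs; omega)
          (PySem.List.pyRange 0 (PySem.List.len bs) 1) c1
          (fun i hi => ((PySem.List.mem_pyRange_one).mp hi).1)
          (by rw [hl1]; exact (PySem.List.len_eq bs).symm)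
          hhit
        rw [← hc2] at this
        exact this
      rw [h2, if_pos hb]
      rfl
    · have hnot : ∀ i ∈ PySem.List.pyRange 0 (PySem.List.len bs) 1,
          ¬(pvMaskHit bs ms i = true ∧ i + shift = (k : Int)) := by
        rintro i hi ⟨hP, he⟩
        obtain ⟨hi0, _⟩ := (PySem.List.mem_pyRange_one).mp hi
        simp only [pvMaskHit, Bool.and_eq_true, beq_iff_eq] at hP
        have hcast : i = ((k - shift.toNat : Nat) : Int) := by omega
        rw [hcast, PySem.List.pyGetD_natCast, PySem.List.pyGetD_natCast] at hP
        exact hb ⟨by omega, hP.1, hP.2⟩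
      have h2 : c2.getD k 0 = pvDigitVal bs k := by
        have hstep := pv_shift_getD_not bs ms shift (PySem.List.len bs) hs k
          (PySem.List.pyRange 0 (PySem.List.len bs) 1) c1
          (fun i hi => ((PySem.List.mem_pyRange_one).mp hi).1)
          hnot
        rw [← hc2] at hstep
        have hfill := pv_fill_getD_mem bs k
          (PySem.List.pyRange 0 (PySem.List.len bs) 1) (List.replicate bs.length 0)
          (fun i hi => ((PySem.List.mem_pyRange_one).mp hi).1)
          (by rw [PySem.List.mem_pyRange_one]
              exact ⟨by omega, by have := PySem.List.len_eq bs; omega⟩)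
          (by rw [List.length_replicate]; exact hkbs)
        rw [← hc1] at hfill
        rw [hstep, hfill]
      rw [h2, if_neg hb]
      -- pvDigitVal of a binary character, rendered back by str
      have hmem : bs.getD k ' ' ∈ bs := by
        have : bs.getD k ' ' = bs[k] := by simp [List.getD, List.getElem?_eq_getElem hkbs]
        rw [this]; exact List.getElem_mem hkbs
      have hqk : PySem.List.pyGetD bs (k : Int) ' ' = bs.getD k ' ' := by
        simp
      rcases hbin _ hmem with h0 | h1
      · have hv : pvDigitVal bs (k : Int) = 0 := by
          simp only [pvDigitVal]; rw [hqk, h0]; decide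
        rw [hv, h0]
        rfl
      · have hv : pvDigitVal bs (k : Int) = 1 := by
          simp only [pvDigitVal]; rw [hqk, h1]; decide
        rw [hv, h1]
        rfl
  rw [List.map_congr_left hpoint, pv_flatten_singleton]

-- ---- B-side: parsing and formatting binary numbers, bit by bit ----

theorem pvParseBin_append (cs : List Char) (c : Char) :
    pvParseBin (cs ++ [c]) = 2 * pvParseBin cs + (if c = '1' then 1 else 0) := by
  simp [pvParseBin, List.foldl_append]

theorem pvParseBin_lt (cs : List Char) : pvParseBin cs < 2 ^ cs.length := by
  induction cs using List.reverseRecOn with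
  | nil => simp [pvParseBin]
  | append_singleton cs c ih =>
    rw [pvParseBin_append]
    have : (if c = '1' then 1 else 0) ≤ 1 := by split <;> omega
    simp only [List.length_append, List.length_cons, List.length_nil, pow_succ]
    omega

theorem pvParseBin_testBit (cs : List Char) :
    ∀ k : Nat, (pvParseBin cs).testBit k =
      (decide (k < cs.length) && decide (cs.getD (cs.length - 1 - k) ' ' = '1')) := by
  induction cs using List.reverseRecOn with
  | nil => intro k; simp [pvParseBin]
  | append_singleton cs c ih =>
    intro k
    rw [pvParseBin_append]
    cases k with
    | zero =>
      rw [Nat.testBit_zero]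
      have hidx : (cs ++ [c]).getD (cs ++ [c]).length.pred ' ' = c := by
        simp [List.getD_append_right, List.length_append]
      have hmod : (2 * pvParseBin cs + (if c = '1' then 1 else 0)) % 2 =
          (if c = '1' then 1 else 0) := by
        split <;> omega
      rw [hmod]
      simp only [List.length_append, List.length_cons, List.length_nil]
      have : cs.length + 1 - 1 - 0 = cs.length := by omega
      rw [this]
      have : (cs ++ [c]).getD cs.length ' ' = c := by
        simp [List.getD_append_right]
      rw [this]
      split <;> simp_all
    | succ k =>
      rw [Nat.testBit_succ]
      have hdiv : (2 * pvParseBin cs + (if c = '1' then 1 else 0)) / 2 = pvParseBin cs := by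
        split <;> omega
      rw [hdiv, ih k]
      by_cases hk : k < cs.length
      · have h1 : cs.length + 1 - 1 - (k + 1) = cs.length - 1 - k := by omega
        have h2 : cs.length - 1 - k < cs.length := by omega
        simp only [List.length_append, List.length_cons, List.length_nil, h1]
        rw [List.getD_append _ _ _ _ h2]
        simp [hk, Nat.lt_succ_of_lt hk, Nat.succ_lt_succ hk]
      · have h1 : ¬ (k + 1 < cs.length + 1) := by omega
        simp [hk, List.length_append, h1]

-- accumulator lemma for the formatter
theorem pvBinAux_append : ∀ (f x : Nat) (acc : List Char),
    pvBinAux f x acc = pvBinAux f x [] ++ acc := by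
  intro f
  induction f with
  | zero => intro x acc; rfl
  | succ g ih =>
    intro x acc
    simp only [pvBinAux]
    split
    · rfl
    · rw [ih (x / 2) _, ih (x / 2) [_]]
      simp

-- fuel irrelevance
theorem pvBinAux_fuel : ∀ (f : Nat) (f' x : Nat), x < f → x < f' →
    pvBinAux f x [] = pvBinAux f' x [] := by
  intro f
  induction f with
  | zero => intro f' x h; omega
  | succ g ih =>
    intro f' x hf hf'
    cases f' with
    | zero => omega
    | succ g' =>
      simp only [pvBinAux]
      split
      · rfl
      · have hx2 : x / 2 < x := Nat.div_lt_self (by omega) (by omega)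
        rw [pvBinAux_append g, pvBinAux_append g', ih g' (x / 2) (by omega) (by omega)]

-- one formatting step stripped off at the least significant end
theorem pvBinRepr_step (x : Nat) (hx : 2 ≤ x) :
    pvBinAux (x + 1) x [] =
      pvBinAux (x / 2 + 1) (x / 2) [] ++ [if x % 2 = 1 then '1' else '0'] := by
  have hx2 : x / 2 < x := Nat.div_lt_self (by omega) (by omega)
  conv_lhs => rw [pvBinAux]
  rw [if_neg (by omega), pvBinAux_append, pvBinAux_fuel x (x / 2 + 1) (x / 2) (by omega) (by omega)]

theorem pvBinRepr_small (x : Nat) (hx : x < 2) :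
    pvBinAux (x + 1) x [] = [if x = 1 then '1' else '0'] := by
  conv_lhs => rw [pvBinAux]
  rw [if_pos hx]

theorem pvBinRepr_length_le : ∀ (n x : Nat), x < 2 ^ n → 1 ≤ n →
    (pvBinAux (x + 1) x []).length ≤ n := by
  intro n
  induction n with
  | zero => intro x _ h; omega
  | succ n ih =>
    intro x hx _
    by_cases h2 : x < 2
    · rw [pvBinRepr_small x h2]; simp
    · have hn1 : 1 ≤ n := by
        by_contra h
        have : n = 0 := by omega
        subst this
        simp at hx; omega
      rw [pvBinRepr_step x (by omega)]
      have : x / 2 < 2 ^ n := by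
        have := Nat.pow_succ 2 n
        omega
      have := ih (x / 2) this hn1
      simp [List.length_append]
      omega

-- zero-padded formatting is exactly the testBit characters, MSB first
theorem pvPadBin_eq_map : ∀ (n x : Nat), x < 2 ^ n → 1 ≤ n →
    List.replicate (n - (pvBinAux (x + 1) x []).length) '0' ++ pvBinAux (x + 1) x []
      = (List.range n).map (fun j => if x.testBit (n - 1 - j) then '1' else '0') := by
  intro n
  induction n with
  | zero => intro x _ h; omega
  | succ n ih =>
    intro x hx _
    by_cases hn0 : n = 0
    · subst hn0
      interval_cases x <;> decide
    · have hn1 : 1 ≤ n := by omega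
      have hx2 : x / 2 < 2 ^ n := by
        have := Nat.pow_succ 2 n
        omega
      -- peel the last (least significant) character off both sides
      have hstep : List.replicate (n + 1 - (pvBinAux (x + 1) x []).length) '0' ++
            pvBinAux (x + 1) x [] =
          (List.replicate (n - (pvBinAux (x / 2 + 1) (x / 2) []).length) '0' ++
            pvBinAux (x / 2 + 1) (x / 2) []) ++ [if x % 2 = 1 then '1' else '0'] := by
        by_cases h2 : x < 2
        · rw [pvBinRepr_small x h2]
          have hx20 : x / 2 = 0 := by omega
          rw [hx20, pvBinRepr_small 0 (by omega)]
          have hc : (if x = 1 then '1' else '0') = (if x % 2 = 1 then '1' else '0') := by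
            interval_cases x <;> rfl
          rw [hc]
          simp only [List.length_cons, List.length_nil]
          have h5 : List.replicate n '0' = List.replicate (n - 1) '0' ++ ['0'] := by
            conv_lhs => rw [show n = (n - 1) + 1 by omega]
            exact List.replicate_succ'
          rw [show n + 1 - (0 + 1) = n by omega, show n - (0 + 1) = n - 1 by omega,
              show (if (0 : Nat) = 1 then '1' else '0') = '0' from rfl, h5, List.append_assoc]
        · rw [pvBinRepr_step x (by omega)]
          have hlen := pvBinRepr_length_le n (x / 2) hx2 hn1
          simp only [List.length_append, List.length_cons, List.length_nil]
          rw [show n + 1 - ((pvBinAux (x / 2 + 1) (x / 2) []).length + 1)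
              = n - (pvBinAux (x / 2 + 1) (x / 2) []).length by omega]
          simp
      rw [hstep, ih (x / 2) hx2 hn1]
      rw [List.range_succ, List.map_append]
      congr 1
      · apply List.map_congr_left
        intro j hj
        have hjn : j < n := List.mem_range.mp hj
        have hidx : n + 1 - 1 - j = (n - 1 - j) + 1 := by omega
        rw [hidx, Nat.testBit_succ]
      · simp only [List.map_cons, List.map_nil]
        rw [show n + 1 - 1 - n = 0 by omega, Nat.testBit_zero]
        congr 1
        by_cases h : x % 2 = 1 <;> simp [h]

-- the shifted-OR value is below 2^n
theorem pv_r_lt (b m s n : Nat) (hb : b < 2 ^ n) : b ||| ((b &&& m) >>> s) < 2 ^ n := by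
  apply Nat.or_lt_two_pow hb
  calc (b &&& m) >>> s ≤ b &&& m := Nat.shiftRight_le _ _
    _ ≤ b := Nat.and_le_left
    _ < 2 ^ n := hb

-- B's result, characterised per output position (bit nonempty, shift ≥ 0):
-- character j is '1' iff bit[j] is '1' or a masked set bit (read from B's
-- truncated-and-padded mask list) lands on j.
theorem pv_B_char (bit mask : String) (shift : Int) (hs : 0 ≤ shift) (hne : bit.toList ≠ []) :
    bin_leftshift_alt bit mask shift = String.mk ((List.range bit.toList.length).map (fun (j : Nat) =>
      if bit.toList.getD j ' ' = '1' ∨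
         (shift ≤ (j : Int) ∧ bit.toList.getD (j - shift.toNat) ' ' = '1' ∧
          (mask.toList.take bit.toList.length ++
            List.replicate (bit.toList.length - (mask.toList.take bit.toList.length).length)
              '0').getD (j - shift.toNat) ' ' = '1')
      then '1' else '0')) := by
  simp only [bin_leftshift_alt]
  set bs := bit.toList with hbs
  set n := bs.length with hn
  have hn1 : 1 ≤ n := by
    cases hv : bs with
    | nil => exact absurd hv hne
    | cons a l => simp [hn, hv]
  rw [if_neg (by omega)]
  apply congrArg
  set mt := mask.toList.take n with hmt
  set mcs := mt ++ List.replicate (n - mt.length) '0' with hmcs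
  have hmtn : mt.length ≤ n := by simp [hmt]
  have hmlen : mcs.length = n := by
    simp only [hmcs, List.length_append, List.length_replicate]
    omega
  set b := pvParseBin bs with hb
  set m := pvParseBin mcs with hm
  set r := b ||| ((b &&& m) >>> shift.toNat) with hr
  have hrlt : r < 2 ^ n := pv_r_lt b m shift.toNat n (pvParseBin_lt bs)
  rw [pvPadBin_eq_map n r hrlt hn1]
  apply List.map_congr_left
  intro j hj
  have hjn : j < n := List.mem_range.mp hj
  have htb : r.testBit (n - 1 - j) =
      ((decide (bs.getD j ' ' = '1')) ||
       (decide (shift ≤ (j : Int)) && (decide (bs.getD (j - shift.toNat) ' ' = '1')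
          && decide (mcs.getD (j - shift.toNat) ' ' = '1')))) := by
    rw [hr, Nat.testBit_lor, Nat.testBit_shiftRight, Nat.testBit_land]
    rw [pvParseBin_testBit bs, pvParseBin_testBit bs, pvParseBin_testBit mcs]
    simp only [hmlen, ← hn]
    have h1 : n - 1 - (n - 1 - j) = j := by omega
    rw [h1]
    by_cases hsj : shift.toNat + (n - 1 - j) < n
    · have h2 : n - 1 - (shift.toNat + (n - 1 - j)) = j - shift.toNat := by omega
      have h3 : shift ≤ (j : Int) := by omega
      have h4 : n - 1 - j < n := by omega
      simp [h2, hjn, hsj, h3, h4, Bool.and_assoc]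
    · have h3 : ¬ shift ≤ ((j : Nat) : Int) := by omega
      have h4 : n - 1 - j < n := by omega
      simp [hjn, hsj, h3, h4]
  rw [htb]
  simp only [Bool.or_eq_true, Bool.and_eq_true, decide_eq_true_eq]

theorem bin_leftshift_eq (bit mask : String) (shift : Int)
    (hpre : Pre_bin_leftshift bit mask shift) :
    bin_leftshift bit mask shift = bin_leftshift_alt bit mask shift := by
  obtain ⟨hs0, hbinB, hmbinB, hcov⟩ := hpre
  by_cases hnil : bit.toList = []
  · -- empty bitstring: both loops run zero times, both sides are the empty string
    simp only [bin_leftshift, bin_leftshift_alt, hnil, PySem.List.len_eq, List.length_nil,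
      Nat.cast_zero, PySem.List.pyRange_one_eq_nil (le_refl (0 : Int)), List.foldl_nil,
      List.map_nil, List.flatten_nil, if_true]
    rfl
  · have hs : 0 ≤ shift := hs0.resolve_right hnil
    have hbin : ∀ c ∈ bit.toList, c = '0' ∨ c = '1' := by
      intro c hc
      have := List.all_eq_true.mp hbinB c hc
      simpa using this
    rw [pv_A_char bit mask shift hs hbin, pv_B_char bit mask shift hs hnil]
    apply congrArg
    apply List.map_congr_left
    intro j hj
    set bs := bit.toList with hbs
    set ms := mask.toList with hms
    set n := bs.length with hn
    have hjn : j < n := List.mem_range.mp hj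
    -- under Pre_, where the source bit is set, B's padded mask list shows the
    -- same character as A's direct mask read
    have hmask : shift ≤ (j : Int) → bs.getD (j - shift.toNat) ' ' = '1' →
        ((ms.take n ++ List.replicate (n - (ms.take n).length) '0').getD (j - shift.toNat) ' '
          = ms.getD (j - shift.toNat) ' ') := by
      intro h1 h2
      have hsrc : j - shift.toNat < n := by omega
      have hcov' : j - shift.toNat < ms.length := by
        apply hcov (j - shift.toNat) (List.mem_range.mpr hsrc)
        exact h2
      have htake : j - shift.toNat < (ms.take n).length := by
        simp [List.length_take]
        omega
      rw [List.getD_append _ _ _ _ htake]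
      simp [List.getD_eq_getElem?_getD, List.getElem?_take_of_lt hsrc]
    by_cases hca : shift ≤ (j : Int) ∧ bs.getD (j - shift.toNat) ' ' = '1' ∧
        ms.getD (j - shift.toNat) ' ' = '1'
    · rw [if_pos hca, if_pos (Or.inr ⟨hca.1, hca.2.1, by
        rw [hmask hca.1 hca.2.1]; exact hca.2.2⟩)]
    · rw [if_neg hca]
      have hjmem : bs.getD j ' ' ∈ bs := by
        have : bs.getD j ' ' = bs[j]'hjn := by
          simp [List.getD, List.getElem?_eq_getElem hjn]
        rw [this]; exact List.getElem_mem hjn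
      rcases hbin _ hjmem with h0 | h1
      · rw [if_neg, h0]
        rintro (h | ⟨ha, hb', hc'⟩)
        · rw [h0] at h; exact absurd h (by decide)
        · exact hca ⟨ha, hb', by rw [← hmask ha hb']; exact hc'⟩
      · rw [if_pos (Or.inl h1), h1]

-- ===== VERDICT (by name: the statement is the Claim_ definition above) =====
theorem bin_leftshift_spec : Claim_equal_bin_leftshift := by
  intro bit mask shift _ hpre
  unfold Spec_bin_leftshift
  exact bin_leftshift_eq bit mask shift hpre
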